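-- pv_equiv track=rewrite | github.com/Lightblues/Leetcode | contest/misc/22银联.py | explorationSupply
-- ===== SOURCE A (Python) =====
-- from typing import List, Optional, Tuple
-- from bisect import bisect_right, bisect_left
--
-- def explorationSupply(station: List[int], pos: List[int]) -> List[int]:
--     n = len(station)
--     ans = []
--     for p in pos:
--         idx = bisect_left(station, p)
--         if idx==0: ans.append(0)
--         elif idx==n: ans.append(idx-1)
--         else:
--             if station[idx]-p < p-station[idx-1]:
--                 ans.append(idx)
--             else: ans.append(idx-1)
--     return ans
-- ===== SOURCE B (Python) =====
-- def explorationSupply(station, pos):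
--     n = len(station)
--     m = len(pos)
--     idxs = [0] * m
--
--     def solve(lo, hi, qs):
--         # batched binary search: all queries in qs share the interval [lo, hi)
--         if not qs:
--             return
--         if lo >= hi:
--             for q in qs:
--                 idxs[q] = lo
--             return
--         mid = (lo + hi) // 2
--         right = [q for q in qs if station[mid] < pos[q]]
--         left = [q for q in qs if not station[mid] < pos[q]]
--         solve(mid + 1, hi, right)
--         solve(lo, mid, left)
--
--     solve(0, n, list(range(m)))
--     ans = []
--     for k in range(m):
--         idx = idxs[k]
--         p = pos[k]
--         if idx == 0:
--             ans.append(0)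
--         elif idx == n:
--             ans.append(n - 1)
--         else:
--             ans.append(idx - 1 if station[idx] - p >= p - station[idx - 1] else idx)
--     return ans
-- ===== Notes on version B (the rewrite author's own statement) =====
-- stated objective: alternative
-- what changed: B replaces A's independent per-query bisect calls with one offline batched divide-and-conquer: a single recursion over station intervals partitions the whole query set at each midpoint, filling an index table, and a final pass turns each table entry into the nearest-station answer.
import Mathlib
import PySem

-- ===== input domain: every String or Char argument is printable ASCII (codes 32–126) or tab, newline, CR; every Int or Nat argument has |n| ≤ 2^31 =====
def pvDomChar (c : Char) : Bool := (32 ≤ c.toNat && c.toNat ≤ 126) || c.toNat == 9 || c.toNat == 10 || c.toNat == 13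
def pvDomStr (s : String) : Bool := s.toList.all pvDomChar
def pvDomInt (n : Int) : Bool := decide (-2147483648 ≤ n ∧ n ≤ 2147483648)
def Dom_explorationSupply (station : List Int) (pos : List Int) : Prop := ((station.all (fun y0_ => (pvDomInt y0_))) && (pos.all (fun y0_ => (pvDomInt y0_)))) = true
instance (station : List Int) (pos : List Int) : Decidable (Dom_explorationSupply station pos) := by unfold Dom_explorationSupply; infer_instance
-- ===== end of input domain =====

-- B replaces A's independent per-query bisect calls with one offline batched divide-and-conquer
-- over station intervals that partitions the whole query set at each midpoint, then a final pass
-- turns the filled index table into answers (objective: alternative algorithm, same results).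

-- ===== PORT A =====
-- faithful transliteration of CPython's bisect.bisect_left(a, x) (lo=0, hi=len(a);
-- while lo<hi: mid=(lo+hi)//2; if a[mid]<x: lo=mid+1 else hi=mid; return lo).
-- a[mid] is always in range (mid < hi ≤ len a), so getD matches Python indexing here.
def bisectGo (a : List Int) (x : Int) (lo hi : Nat) : Nat :=
  if h : lo < hi then
    let mid := (lo + hi) / 2
    if a.getD mid 0 < x then bisectGo a x (mid + 1) hi else bisectGo a x lo mid
  else lo
termination_by hi - lo
decreasing_by
  · omega
  · omega

def bisectLeft (a : List Int) (x : Int) : Nat := bisectGo a x 0 a.length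

-- A: for each p append one answer to ans; station[idx], station[idx-1] are in range
-- in the branch that reads them (0 < idx < n), so getD matches Python indexing.
def explorationSupply (station : List Int) (pos : List Int) : List Int :=
  let n := station.length
  pos.foldl
    (fun ans p =>
      let idx := bisectLeft station p
      if idx = 0 then ans ++ [0]
      else if idx = n then ans ++ [(idx : Int) - 1]
      else if station.getD idx 0 - p < p - station.getD (idx - 1) 0 then ans ++ [(idx : Int)]
      else ans ++ [(idx : Int) - 1])
    []

-- ===== PORT B =====
-- B's recursive batched search solve(lo, hi, qs), with the idxs table threaded as state
-- instead of mutated in place; station[mid], pos[q] are in range when read (mid < hi ≤ n,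
-- q ∈ range m), and idxs[q] = lo sets q < len idxs, so getD / set match Python.
def solveB (station : List Int) (pos : List Int) (lo hi : Nat) (qs : List Nat) (idxs : List Nat) : List Nat :=
  if qs = [] then idxs
  else if h : lo < hi then
    let mid := (lo + hi) / 2
    let right := qs.filter (fun q => decide (station.getD mid 0 < pos.getD q 0))
    let left := qs.filter (fun q => !decide (station.getD mid 0 < pos.getD q 0))
    solveB station pos lo mid left (solveB station pos (mid + 1) hi right idxs)
  else qs.foldl (fun r q => r.set q lo) idxs
termination_by hi - lo
decreasing_by
  · omega
  · omega

-- B's final pass over range(m); station[idx], station[idx-1] are in range when read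
-- (0 < idx and idx ≠ n with idx = a bisect result ≤ n), so getD matches Python indexing.
def explorationSupply_alt (station : List Int) (pos : List Int) : List Int :=
  let n := station.length
  let m := pos.length
  let idxs := solveB station pos 0 n (List.range m) (List.replicate m 0)
  (List.range m).foldl
    (fun ans k =>
      let idx := idxs.getD k 0
      let p := pos.getD k 0
      if idx = 0 then ans ++ [(0 : Int)]
      else if idx = n then ans ++ [(n : Int) - 1]
      else ans ++ [if station.getD idx 0 - p ≥ p - station.getD (idx - 1) 0 then (idx : Int) - 1 else (idx : Int)])
    []

-- ===== PRECONDITION & SPEC =====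
def Spec_explorationSupply (station : List Int) (pos : List Int) (out : List Int) : Prop := out = explorationSupply_alt station pos
instance (station : List Int) (pos : List Int) (out : List Int) : Decidable (Spec_explorationSupply station pos out) := by unfold Spec_explorationSupply; infer_instance

-- ===== CLAIM (what is proved, stated in full; the proofs are below) =====
def Claim_equal_explorationSupply : Prop := ∀ (station : List Int) (pos : List Int), Dom_explorationSupply station pos → Spec_explorationSupply station pos (explorationSupply station pos)

-- ===== LEMMAS AND PROOFS =====

-- A's per-element answer, as a function of the position value
def ansA (s : List Int) (p : Int) : Int :=
  if bisectLeft s p = 0 then 0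
  else if bisectLeft s p = s.length then (bisectLeft s p : Int) - 1
  else if s.getD (bisectLeft s p) 0 - p < p - s.getD (bisectLeft s p - 1) 0 then (bisectLeft s p : Int)
  else (bisectLeft s p : Int) - 1

-- A's foldl-append loop is a map
theorem foldl_append_map {α β : Type} (f : α → β) (l : List α) :
    ∀ acc : List β, l.foldl (fun ans p => ans ++ [f p]) acc = acc ++ l.map f := by
  induction l with
  | nil => intro acc; simp
  | cons a l ih => intro acc; simp [List.foldl_cons, ih, List.append_assoc]

theorem explorationSupply_eq_map (s : List Int) (pos : List Int) :
    explorationSupply s pos = pos.map (ansA s) := by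
  show pos.foldl _ [] = _
  have hstep : (fun (ans : List Int) (p : Int) =>
      let idx := bisectLeft s p
      if idx = 0 then ans ++ [(0 : Int)]
      else if idx = s.length then ans ++ [(idx : Int) - 1]
      else if s.getD idx 0 - p < p - s.getD (idx - 1) 0 then ans ++ [(idx : Int)]
      else ans ++ [(idx : Int) - 1])
      = (fun (ans : List Int) (p : Int) => ans ++ [ansA s p]) := by
    funext ans p
    simp only [ansA]
    split_ifs <;> rfl
  rw [hstep, foldl_append_map]
  simp

-- writing the constant v at every index of qs (in-range indices): length and entries
theorem foldl_setc_length (v : Nat) :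
    ∀ (qs : List Nat) (idxs : List Nat),
      (qs.foldl (fun r q => r.set q v) idxs).length = idxs.length := by
  intro qs
  induction qs with
  | nil => intro idxs; rfl
  | cons q rest ih => intro idxs; rw [List.foldl_cons, ih, List.length_set]

theorem foldl_setc_getD (v : Nat) :
    ∀ (qs : List Nat) (idxs : List Nat), (∀ q ∈ qs, q < idxs.length) →
      ∀ k, (qs.foldl (fun r q => r.set q v) idxs).getD k 0
        = if k ∈ qs then v else idxs.getD k 0 := by
  intro qs
  induction qs with
  | nil => intro idxs _ k; simp
  | cons q rest ih =>
    intro idxs hrange k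
    rw [List.foldl_cons]
    have hq : q < idxs.length := hrange q List.mem_cons_self
    rw [ih (idxs.set q v)
        (by intro i hi; rw [List.length_set]; exact hrange i (List.mem_cons_of_mem _ hi)) k]
    by_cases hk : k ∈ rest
    · rw [if_pos hk, if_pos (List.mem_cons_of_mem _ hk)]
    · rw [if_neg hk]
      by_cases hkq : k = q
      · subst hkq
        rw [if_pos List.mem_cons_self]
        rw [List.getD_eq_getElem _ 0 (by rw [List.length_set]; exact hq)]
        simp [List.getElem_set_self]
      · rw [if_neg (by simp [hkq, hk])]
        by_cases hkl : k < idxs.length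
        · rw [List.getD_eq_getElem _ 0 (by rw [List.length_set]; exact hkl),
              List.getD_eq_getElem _ 0 hkl]
          exact List.getElem_set_ne (show q ≠ k from fun h => hkq h.symm) _
        · rw [List.getD_eq_default _ 0 (by rw [List.length_set]; omega),
              List.getD_eq_default _ 0 (by omega)]

theorem bisectGo_step (a : List Int) (x : Int) (lo hi : Nat) (h : lo < hi) :
    bisectGo a x lo hi
      = if a.getD ((lo + hi) / 2) 0 < x then bisectGo a x ((lo + hi) / 2 + 1) hi
        else bisectGo a x lo ((lo + hi) / 2) := by
  rw [bisectGo, dif_pos h]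

-- solveB preserves the table length
theorem solveB_length (s : List Int) (pos : List Int) :
    ∀ (d lo hi : Nat), hi - lo ≤ d → ∀ (qs : List Nat) (idxs : List Nat),
      (solveB s pos lo hi qs idxs).length = idxs.length := by
  intro d
  induction d with
  | zero =>
    intro lo hi hd qs idxs
    rw [solveB]
    by_cases hq : qs = []
    · rw [if_pos hq]
    · rw [if_neg hq, dif_neg (by omega)]
      exact foldl_setc_length lo qs idxs
  | succ d ih =>
    intro lo hi hd qs idxs
    rw [solveB]
    by_cases hq : qs = []
    · rw [if_pos hq]
    · rw [if_neg hq]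
      by_cases h : lo < hi
      · rw [dif_pos h]
        rw [ih lo ((lo + hi) / 2) (by omega), ih ((lo + hi) / 2 + 1) hi (by omega)]
      · rw [dif_neg h]
        exact foldl_setc_length lo qs idxs

-- the batched search computes bisect_left's loop for every query in the batch:
-- each query follows exactly the probe path of bisectGo on its own value
theorem solveB_getD (s : List Int) (pos : List Int) :
    ∀ (d lo hi : Nat), hi - lo ≤ d → ∀ (qs : List Nat) (idxs : List Nat),
      (∀ q ∈ qs, q < idxs.length) → ∀ k,
      (solveB s pos lo hi qs idxs).getD k 0
        = if k ∈ qs then bisectGo s (pos.getD k 0) lo hi else idxs.getD k 0 := by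
  intro d
  induction d with
  | zero =>
    intro lo hi hd qs idxs hrange k
    rw [solveB]
    by_cases hq : qs = []
    · rw [if_pos hq]; subst hq; simp
    · rw [if_neg hq, dif_neg (by omega), foldl_setc_getD lo qs idxs hrange k]
      by_cases hk : k ∈ qs
      · rw [if_pos hk, if_pos hk, bisectGo, dif_neg (by omega)]
      · rw [if_neg hk, if_neg hk]
  | succ d ih =>
    intro lo hi hd qs idxs hrange k
    rw [solveB]
    by_cases hq : qs = []
    · rw [if_pos hq]; subst hq; simp
    · rw [if_neg hq]
      by_cases h : lo < hi
      · rw [dif_pos h]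
        set mid := (lo + hi) / 2 with hmid
        set right := qs.filter (fun q => decide (s.getD mid 0 < pos.getD q 0)) with hright
        set left := qs.filter (fun q => !decide (s.getD mid 0 < pos.getD q 0)) with hleft
        have hrlen : (solveB s pos (mid + 1) hi right idxs).length = idxs.length :=
          solveB_length s pos (hi - (mid + 1)) (mid + 1) hi le_rfl right idxs
        have hrr : ∀ q ∈ right, q < idxs.length := by
          intro q hqr; exact hrange q (List.mem_of_mem_filter hqr)
        have hinner := ih (mid + 1) hi (by omega) right idxs hrr
        rw [ih lo mid (by omega) left (solveB s pos (mid + 1) hi right idxs)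
            (by intro q hql; rw [hrlen]; exact hrange q (List.mem_of_mem_filter hql)) k]
        by_cases hk : k ∈ qs
        · rw [if_pos hk, bisectGo_step s (pos.getD k 0) lo hi h, ← hmid]
          by_cases hc : s.getD mid 0 < pos.getD k 0
          · have hkr : k ∈ right := by
              rw [hright, List.mem_filter]; exact ⟨hk, decide_eq_true hc⟩
            have hkl : k ∉ left := by
              rw [hleft, List.mem_filter]
              rintro ⟨-, hb⟩
              rw [Bool.not_eq_true', decide_eq_false_iff_not] at hb
              exact hb hc
            rw [if_pos hc, if_neg hkl, hinner k, if_pos hkr]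
          · have hkl : k ∈ left := by
              rw [hleft, List.mem_filter]
              exact ⟨hk, by rw [Bool.not_eq_true', decide_eq_false_iff_not]; exact hc⟩
            rw [if_neg hc, if_pos hkl]
        · have hkr : k ∉ right := fun hx => hk (List.mem_of_mem_filter hx)
          have hkl : k ∉ left := fun hx => hk (List.mem_of_mem_filter hx)
          rw [if_neg hk, if_neg hkl, hinner k, if_neg hkr]
      · rw [dif_neg h, foldl_setc_getD lo qs idxs hrange k]
        by_cases hk : k ∈ qs
        · rw [if_pos hk, if_pos hk, bisectGo, dif_neg h]
        · rw [if_neg hk, if_neg hk]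

-- B's final-pass branch equals A's branch
theorem branch_eq_ansA (s : List Int) (p : Int) (idx : Nat) (hidx : idx = bisectLeft s p) :
    (if idx = 0 then (0 : Int)
     else if idx = s.length then (s.length : Int) - 1
     else if s.getD idx 0 - p ≥ p - s.getD (idx - 1) 0 then (idx : Int) - 1 else (idx : Int))
    = ansA s p := by
  unfold ansA
  rw [← hidx]
  by_cases h0 : idx = 0
  · rw [if_pos h0, if_pos h0]
  · rw [if_neg h0, if_neg h0]
    by_cases hn : idx = s.length
    · rw [if_pos hn, if_pos hn, hn]
    · rw [if_neg hn, if_neg hn]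
      by_cases hbd : s.getD idx 0 - p < p - s.getD (idx - 1) 0
      · rw [if_pos hbd, if_neg (by omega)]
      · rw [if_neg hbd, if_pos (by omega)]

-- ===== VERDICT (by name: the statement is the Claim_ definition above) =====
theorem explorationSupply_spec : Claim_equal_explorationSupply := by
  intro s pos _hdom
  show explorationSupply s pos = explorationSupply_alt s pos
  set n := s.length with hn
  set m := pos.length with hm
  set idxs := solveB s pos 0 n (List.range m) (List.replicate m 0) with hidxs
  have hidx : ∀ k < m, idxs.getD k 0 = bisectLeft s (pos.getD k 0) := by
    intro k hk
    rw [hidxs, solveB_getD s pos n 0 n (by omega) (List.range m) (List.replicate m 0)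
        (by intro q hq; rw [List.length_replicate]; exact List.mem_range.mp hq) k,
        if_pos (List.mem_range.mpr hk)]
    rfl
  have halt : explorationSupply_alt s pos = (List.range m).map (fun k =>
      let idx := idxs.getD k 0
      let p := pos.getD k 0
      if idx = 0 then (0 : Int)
      else if idx = n then (n : Int) - 1
      else if s.getD idx 0 - p ≥ p - s.getD (idx - 1) 0 then (idx : Int) - 1 else (idx : Int)) := by
    show (List.range m).foldl _ [] = _
    have hstep : (fun (ans : List Int) (k : Nat) =>
        let idx := idxs.getD k 0
        let p := pos.getD k 0
        if idx = 0 then ans ++ [(0 : Int)]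
        else if idx = n then ans ++ [(n : Int) - 1]
        else ans ++ [if s.getD idx 0 - p ≥ p - s.getD (idx - 1) 0 then (idx : Int) - 1 else (idx : Int)])
        = (fun (ans : List Int) (k : Nat) => ans ++ [
          let idx := idxs.getD k 0
          let p := pos.getD k 0
          if idx = 0 then (0 : Int)
          else if idx = n then (n : Int) - 1
          else if s.getD idx 0 - p ≥ p - s.getD (idx - 1) 0 then (idx : Int) - 1 else (idx : Int)]) := by
      funext ans k
      simp only
      split_ifs <;> rfl
    rw [hstep, foldl_append_map]
    simp
  rw [explorationSupply_eq_map, halt]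
  apply List.ext_getElem (by simp [hm])
  intro k hk1 hk2
  have hkm : k < m := by simpa [hm] using hk1
  rw [List.getElem_map, List.getElem_map, List.getElem_range]
  simp only
  rw [hidx k hkm]
  rw [branch_eq_ansA s (pos.getD k 0) (bisectLeft s (pos.getD k 0)) rfl]
  congr 1
  exact (List.getD_eq_getElem pos 0 (by rw [hm] at hkm; exact hkm)).symm
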